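-- pv_equiv track=rewrite | github.com/SWDesertPenguin/DigitalSeance | scripts/check_audit_label_parity.py | diff_registries
-- ===== SOURCE A (Python) =====
-- def diff_registries(
--     py_labels: dict[str, str],
--     js_labels: dict[str, str],
-- ) -> list[str]:
--     """Return a list of human-readable drift descriptions (empty = parity)."""
--     errors: list[str] = []
--     py_keys = set(py_labels)
--     js_keys = set(js_labels)
--     for key in sorted(py_keys - js_keys):
--         errors.append(
--             f"  backend has key {key!r} but frontend mirror does not",
--         )
--     for key in sorted(js_keys - py_keys):
--         errors.append(
--             f"  frontend has key {key!r} but backend registry does not",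
--         )
--     for key in sorted(py_keys & js_keys):
--         if py_labels[key] != js_labels[key]:
--             errors.append(
--                 f"  label drift on {key!r}: "
--                 f"backend={py_labels[key]!r} frontend={js_labels[key]!r}",
--             )
--     return errors
-- ===== SOURCE B (Python) =====
-- def diff_registries(
--     py_labels: dict[str, str],
--     js_labels: dict[str, str],
-- ) -> list[str]:
--     """Return a list of human-readable drift descriptions (empty = parity)."""
--     ps = sorted(py_labels)
--     js = sorted(js_labels)
--     backend: list[str] = []
--     frontend: list[str] = []
--     drift: list[str] = []
--     i = j = 0
--     while i < len(ps) and j < len(js):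
--         a, b = ps[i], js[j]
--         if a < b:
--             backend.append(f"  backend has key {a!r} but frontend mirror does not")
--             i += 1
--         elif b < a:
--             frontend.append(f"  frontend has key {b!r} but backend registry does not")
--             j += 1
--         else:
--             if py_labels[a] != js_labels[a]:
--                 drift.append(
--                     f"  label drift on {a!r}: "
--                     f"backend={py_labels[a]!r} frontend={js_labels[a]!r}",
--                 )
--             i += 1
--             j += 1
--     for a in ps[i:]:
--         backend.append(f"  backend has key {a!r} but frontend mirror does not")
--     for b in js[j:]:
--         frontend.append(f"  frontend has key {b!r} but backend registry does not")
--     return backend + frontend + drift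
-- ===== Notes on version B (the rewrite author's own statement) =====
-- stated objective: alternative
-- what changed: Replaces A's set-algebra decomposition (compute py-js, js-py and the intersection, sorting each result separately) by sorting the two key lists once and classifying every key in a single two-pointer merge over the sorted lists, which emits each of the three sections already in order.
import Mathlib
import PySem

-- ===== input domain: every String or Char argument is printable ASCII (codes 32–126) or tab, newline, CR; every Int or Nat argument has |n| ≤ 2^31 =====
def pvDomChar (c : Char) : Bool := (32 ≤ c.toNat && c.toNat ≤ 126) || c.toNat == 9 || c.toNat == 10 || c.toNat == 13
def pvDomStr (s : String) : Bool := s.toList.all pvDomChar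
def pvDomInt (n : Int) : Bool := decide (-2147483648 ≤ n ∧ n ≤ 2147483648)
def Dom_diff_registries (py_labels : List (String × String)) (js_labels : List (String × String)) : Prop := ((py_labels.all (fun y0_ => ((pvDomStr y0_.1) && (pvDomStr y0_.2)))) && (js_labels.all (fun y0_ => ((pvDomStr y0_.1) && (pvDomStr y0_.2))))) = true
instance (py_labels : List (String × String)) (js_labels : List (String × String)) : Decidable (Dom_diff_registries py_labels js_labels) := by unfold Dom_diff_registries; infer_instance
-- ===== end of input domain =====

-- B replaces A's three set-algebra passes (difference, reverse difference, intersection scan,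
-- each sorted separately) by sorting the two key lists once and classifying the keys in a single
-- two-pointer merge, which produces each section already in sorted order (objective: alternative
-- algorithm, same asymptotic cost); return values are proved identical.

-- ===== PORT A =====
-- Python's repr(s) for the strings of the domain (printable ASCII + tab/newline/CR): both f-strings
-- use {…!r}, so both ports share this language-level helper.  Exact on the stated domain.
def pyReprChar (q : Char) (c : Char) : List Char :=
  if c = '\\' then ['\\', '\\']
  else if c = q then ['\\', q]
  else if c = '\t' then ['\\', 't']
  else if c = '\n' then ['\\', 'n']
  else if c = '\r' then ['\\', 'r']
  else [c]

def pyRepr (s : String) : String :=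
  let cs := s.toList
  let q : Char := if cs.contains '\'' && !(cs.contains '"') then '"' else '\''
  String.ofList ([q] ++ cs.flatMap (pyReprChar q) ++ [q])

-- the three f-string message shapes (shared: identical literals in A and B)
def msgBackend (k : String) : String :=
  "  backend has key " ++ pyRepr k ++ " but frontend mirror does not"
def msgFrontend (k : String) : String :=
  "  frontend has key " ++ pyRepr k ++ " but backend registry does not"
def msgDrift (k bv jv : String) : String :=
  "  label drift on " ++ pyRepr k ++ ": backend=" ++ pyRepr bv ++ " frontend=" ++ pyRepr jv

def diff_registries (py_labels : List (String × String)) (js_labels : List (String × String)) : List String :=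
  let pyd := PySem.Dict.ofList py_labels
  let jsd := PySem.Dict.ofList js_labels
  let py_keys : PySem.Set String := PySem.Set.ofList pyd.keys
  let js_keys : PySem.Set String := PySem.Set.ofList jsd.keys
  let errors : List String := []
  let errors := (PySem.List.sorted (PySem.Set.diff py_keys js_keys) (fun k => k)).foldl
    (fun errors key => errors ++ [msgBackend key]) errors
  let errors := (PySem.List.sorted (PySem.Set.diff js_keys py_keys) (fun k => k)).foldl
    (fun errors key => errors ++ [msgFrontend key]) errors
  let errors := (PySem.List.sorted (PySem.Set.inter py_keys js_keys) (fun k => k)).foldl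
    (fun errors key =>
      if pyd.getD key "" != jsd.getD key "" then
        errors ++ [msgDrift key (pyd.getD key "") (jsd.getD key "")]
      else errors) errors
  errors

-- ===== PORT B =====
-- the while loop of Source B: consume the two SORTED key lists with two pointers, classifying each
-- key into the backend-only / frontend-only / drift section as it is passed; the trailing
-- 'for … in ps[i:] / js[j:]' loops are the base cases.
def mergeLoop (pyd jsd : PySem.Dict String String)
    (ps js back front drift : List String) : List String × List String × List String :=
  match ps, js with
  | a :: ps', b :: js' =>
    if a < b then mergeLoop pyd jsd ps' (b :: js') (back ++ [msgBackend a]) front drift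
    else if b < a then mergeLoop pyd jsd (a :: ps') js' back (front ++ [msgFrontend b]) drift
    else if pyd.getD a "" != jsd.getD a "" then
      mergeLoop pyd jsd ps' js' back front
        (drift ++ [msgDrift a (pyd.getD a "") (jsd.getD a "")])
    else mergeLoop pyd jsd ps' js' back front drift
  | ps, js => (back ++ ps.map msgBackend, front ++ js.map msgFrontend, drift)
termination_by ps.length + js.length
decreasing_by all_goals (simp; try omega)

def diff_registries_alt (py_labels : List (String × String)) (js_labels : List (String × String)) : List String :=
  let pyd := PySem.Dict.ofList py_labels
  let jsd := PySem.Dict.ofList js_labels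
  let ps := PySem.List.sorted pyd.keys (fun k => k)
  let js := PySem.List.sorted jsd.keys (fun k => k)
  let r := mergeLoop pyd jsd ps js [] [] []
  r.1 ++ r.2.1 ++ r.2.2

-- ===== PRECONDITION & SPEC =====
def Spec_diff_registries (py_labels : List (String × String)) (js_labels : List (String × String)) (out : List String) : Prop := out = diff_registries_alt py_labels js_labels
instance (py_labels : List (String × String)) (js_labels : List (String × String)) (out : List String) : Decidable (Spec_diff_registries py_labels js_labels out) := by unfold Spec_diff_registries; infer_instance

-- ===== CLAIM (what is proved, stated in full; the proofs are below) =====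
def Claim_equal_diff_registries : Prop := ∀ (py_labels : List (String × String)) (js_labels : List (String × String)), Dom_diff_registries py_labels js_labels → Spec_diff_registries py_labels js_labels (diff_registries py_labels js_labels)

-- ===== LEMMAS AND PROOFS =====

-- the merge over two strictly sorted key lists computes the three filtered sections
lemma contains_eq_false_of_lt {x : String} {l : List String} (h : ∀ k ∈ l, x < k) :
    l.contains x = false := by
  simp only [← Bool.not_eq_true, List.contains_iff_mem]
  intro hm; exact absurd rfl (ne_of_lt (h x hm))

lemma contains_cons_eq_of_lt {x : String} {l : List String} (k : String) (h : x < k) :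
    (x :: l).contains k = l.contains k := by
  rw [List.contains_cons]
  have hne : (k == x) = false := beq_eq_false_iff_ne.mpr (ne_of_gt h)
  rw [hne, Bool.false_or]

lemma mergeLoop_eq (pyd jsd : PySem.Dict String String) (ps js : List String)
    (hps : ps.Pairwise (· < ·)) (hjs : js.Pairwise (· < ·))
    (back front drift : List String) :
    mergeLoop pyd jsd ps js back front drift =
      (back ++ (ps.filter (fun k => !js.contains k)).map msgBackend,
       front ++ (js.filter (fun k => !ps.contains k)).map msgFrontend,
       drift ++ (ps.filter (fun k => js.contains k
          && (pyd.getD k "" != jsd.getD k ""))).map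
         (fun k => msgDrift k (pyd.getD k "") (jsd.getD k ""))) := by
  fun_induction mergeLoop pyd jsd ps js back front drift with
  | case1 back front drift a ps' b js' h ih =>
    obtain ⟨ha, hps'⟩ := List.pairwise_cons.mp hps
    have hb := (List.pairwise_cons.mp hjs).1
    have hbj : ∀ k ∈ b :: js', a < k := by
      intro k hk
      rcases List.mem_cons.mp hk with rfl | hk
      · exact h
      · exact lt_trans h (hb k hk)
    have hnotin : (b :: js').contains a = false := contains_eq_false_of_lt hbj
    have e1 : List.filter (fun k => !(b :: js').contains k) (a :: ps')
        = a :: List.filter (fun k => !(b :: js').contains k) ps' :=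
      List.filter_cons_of_pos (by show (!(b :: js').contains a) = true; rw [hnotin]; rfl)
    have e2 : List.filter (fun k => !(a :: ps').contains k) (b :: js')
        = List.filter (fun k => !ps'.contains k) (b :: js') :=
      List.filter_congr fun k hk => by rw [contains_cons_eq_of_lt k (hbj k hk)]
    have e3 : List.filter (fun k => (b :: js').contains k && (pyd.getD k "" != jsd.getD k "")) (a :: ps')
        = List.filter (fun k => (b :: js').contains k && (pyd.getD k "" != jsd.getD k "")) ps' :=
      List.filter_cons_of_neg (by
        show ¬((b :: js').contains a && (pyd.getD a "" != jsd.getD a "")) = true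
        rw [hnotin]; simp)
    rw [e1, e2, e3, ih hps' hjs]
    simp
  | case2 back front drift a ps' b js' hab h ih =>
    obtain ⟨hb, hjs'⟩ := List.pairwise_cons.mp hjs
    have ha := (List.pairwise_cons.mp hps).1
    have hap : ∀ k ∈ a :: ps', b < k := by
      intro k hk
      rcases List.mem_cons.mp hk with rfl | hk
      · exact h
      · exact lt_trans h (ha k hk)
    have hnotin : (a :: ps').contains b = false := contains_eq_false_of_lt hap
    have e1 : List.filter (fun k => !(b :: js').contains k) (a :: ps')
        = List.filter (fun k => !js'.contains k) (a :: ps') :=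
      List.filter_congr fun k hk => by rw [contains_cons_eq_of_lt k (hap k hk)]
    have e2 : List.filter (fun k => !(a :: ps').contains k) (b :: js')
        = b :: List.filter (fun k => !(a :: ps').contains k) js' :=
      List.filter_cons_of_pos (by show (!(a :: ps').contains b) = true; rw [hnotin]; rfl)
    have e3 : List.filter (fun k => (b :: js').contains k && (pyd.getD k "" != jsd.getD k "")) (a :: ps')
        = List.filter (fun k => js'.contains k && (pyd.getD k "" != jsd.getD k "")) (a :: ps') :=
      List.filter_congr fun k hk => by rw [contains_cons_eq_of_lt k (hap k hk)]
    rw [e1, e2, e3, ih hps hjs']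
    simp
  | case3 back front drift a ps' b js' hab hba hp ih =>
    have hba' : a = b := le_antisymm (not_lt.mp hba) (not_lt.mp hab)
    subst hba'
    obtain ⟨ha, hps'⟩ := List.pairwise_cons.mp hps
    obtain ⟨hb, hjs'⟩ := List.pairwise_cons.mp hjs
    have hin : (a :: js').contains a = true := by
      rw [List.contains_cons, BEq.rfl, Bool.true_or]
    have e1 : List.filter (fun k => !(a :: js').contains k) (a :: ps')
        = List.filter (fun k => !js'.contains k) ps' := by
      rw [List.filter_cons_of_neg (by show (!(a :: js').contains a) = true → False; rw [hin]; simp)]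
      exact List.filter_congr fun k hk => by rw [contains_cons_eq_of_lt k (ha k hk)]
    have e2 : List.filter (fun k => !(a :: ps').contains k) (a :: js')
        = List.filter (fun k => !ps'.contains k) js' := by
      have hin' : (a :: ps').contains a = true := by
        rw [List.contains_cons, BEq.rfl, Bool.true_or]
      rw [List.filter_cons_of_neg (by show (!(a :: ps').contains a) = true → False; rw [hin']; simp)]
      exact List.filter_congr fun k hk => by rw [contains_cons_eq_of_lt k (hb k hk)]
    have e3 : List.filter (fun k => (a :: js').contains k && (pyd.getD k "" != jsd.getD k "")) (a :: ps')
        = a :: List.filter (fun k => js'.contains k && (pyd.getD k "" != jsd.getD k "")) ps' := by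
      rw [List.filter_cons_of_pos (by show ((a :: js').contains a && _) = true; rw [hin, hp]; rfl)]
      exact congrArg (a :: ·) (List.filter_congr fun k hk => by
        rw [contains_cons_eq_of_lt k (ha k hk)])
    rw [e1, e2, e3, ih hps' hjs']
    simp
  | case4 back front drift a ps' b js' hab hba hp ih =>
    have hba' : a = b := le_antisymm (not_lt.mp hba) (not_lt.mp hab)
    subst hba'
    obtain ⟨ha, hps'⟩ := List.pairwise_cons.mp hps
    obtain ⟨hb, hjs'⟩ := List.pairwise_cons.mp hjs
    have hp' : (pyd.getD a "" != jsd.getD a "") = false := by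
      revert hp; cases (pyd.getD a "" != jsd.getD a "") <;> simp
    have hin : (a :: js').contains a = true := by
      rw [List.contains_cons, BEq.rfl, Bool.true_or]
    have e1 : List.filter (fun k => !(a :: js').contains k) (a :: ps')
        = List.filter (fun k => !js'.contains k) ps' := by
      rw [List.filter_cons_of_neg (by show (!(a :: js').contains a) = true → False; rw [hin]; simp)]
      exact List.filter_congr fun k hk => by rw [contains_cons_eq_of_lt k (ha k hk)]
    have e2 : List.filter (fun k => !(a :: ps').contains k) (a :: js')
        = List.filter (fun k => !ps'.contains k) js' := by
      have hin' : (a :: ps').contains a = true := by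
        rw [List.contains_cons, BEq.rfl, Bool.true_or]
      rw [List.filter_cons_of_neg (by show (!(a :: ps').contains a) = true → False; rw [hin']; simp)]
      exact List.filter_congr fun k hk => by rw [contains_cons_eq_of_lt k (hb k hk)]
    have e3 : List.filter (fun k => (a :: js').contains k && (pyd.getD k "" != jsd.getD k "")) (a :: ps')
        = List.filter (fun k => js'.contains k && (pyd.getD k "" != jsd.getD k "")) ps' := by
      rw [List.filter_cons_of_neg (by
        show ((a :: js').contains a && (pyd.getD a "" != jsd.getD a "")) = true → False
        rw [hin, hp']; simp)]
      exact List.filter_congr fun k hk => by rw [contains_cons_eq_of_lt k (ha k hk)]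
    rw [e1, e2, e3, ih hps' hjs']
  | case5 back front drift ps js h =>
    rcases ps with _ | ⟨a, ps'⟩ <;> rcases js with _ | ⟨b, js'⟩ <;>
      first
        | exact (h _ _ _ _ rfl rfl).elim
        | simp

-- a sorted Nodup list is strictly sorted
lemma sorted_pairwise_lt (l : List String) (hnd : l.Nodup) :
    (PySem.List.sorted l (fun k => k)).Pairwise (fun a b => a < b) := by
  have hsnd : (PySem.List.sorted l (fun k => k)).Nodup :=
    ((PySem.List.sorted_perm l (fun k => k) false).symm).nodup hnd
  have hle := PySem.List.sorted_pairwise (xs := l) (key := fun k => k)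
  exact (hle.and hsnd).imp (fun h => lt_of_le_of_ne h.1 h.2)

-- filtering a strictly sorted list commutes with sorting the filter
lemma sorted_filter_comm (l : List String) (hnd : l.Nodup) (p : String → Bool) :
    (PySem.List.sorted l (fun k => k)).filter p
      = PySem.List.sorted (l.filter p) (fun k => k) := by
  refine (PySem.List.sorted_eq_of_perm_of_pairwise_lt _ _ _ ?_ ?_).symm
  · exact ((PySem.List.sorted_perm l (fun k => k) false).filter p)
  · exact (sorted_pairwise_lt l hnd).filter p

-- ===== VERDICT (by name: the statement is the Claim_ definition above) =====
theorem diff_registries_spec : Claim_equal_diff_registries := by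
  intro py_labels js_labels _
  have hk : (PySem.Dict.ofList py_labels).keys.Nodup := PySem.Dict.nodup_keys_ofList py_labels
  have hj : (PySem.Dict.ofList js_labels).keys.Nodup := PySem.Dict.nodup_keys_ofList js_labels
  have hsj : ∀ k, (PySem.List.sorted (PySem.Dict.ofList js_labels).keys (fun k => k)).contains k
      = PySem.Set.contains (PySem.Dict.ofList js_labels).keys k := by
    intro k
    rw [Bool.eq_iff_iff]
    simp [PySem.Set.contains, PySem.List.mem_sorted]
  have hsp : ∀ k, (PySem.List.sorted (PySem.Dict.ofList py_labels).keys (fun k => k)).contains k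
      = PySem.Set.contains (PySem.Dict.ofList py_labels).keys k := by
    intro k
    rw [Bool.eq_iff_iff]
    simp [PySem.Set.contains, PySem.List.mem_sorted]
  unfold Spec_diff_registries diff_registries diff_registries_alt
  dsimp only
  rw [mergeLoop_eq _ _ _ _ (sorted_pairwise_lt _ hk) (sorted_pairwise_lt _ hj)]
  simp only [PySem.Set.ofList_eq_self_of_nodup _ hk, PySem.Set.ofList_eq_self_of_nodup _ hj,
    PySem.List.foldl_append_singleton_eq_map, PySem.List.foldl_append_if,
    List.nil_append, List.append_assoc]
  have b1 : List.filter (fun k => !(PySem.List.sorted (PySem.Dict.ofList js_labels).keys (fun k => k)).contains k)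
        (PySem.List.sorted (PySem.Dict.ofList py_labels).keys (fun k => k))
      = PySem.List.sorted (PySem.Set.diff (PySem.Dict.ofList py_labels).keys (PySem.Dict.ofList js_labels).keys) (fun k => k) := by
    rw [sorted_filter_comm _ hk]
    congr 1
    unfold PySem.Set.diff PySem.Set.contains
    exact List.filter_congr fun x _ => by rw [hsj x]; rfl
  have b2 : List.filter (fun k => !(PySem.List.sorted (PySem.Dict.ofList py_labels).keys (fun k => k)).contains k)
        (PySem.List.sorted (PySem.Dict.ofList js_labels).keys (fun k => k))
      = PySem.List.sorted (PySem.Set.diff (PySem.Dict.ofList js_labels).keys (PySem.Dict.ofList py_labels).keys) (fun k => k) := by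
    rw [sorted_filter_comm _ hj]
    congr 1
    unfold PySem.Set.diff PySem.Set.contains
    exact List.filter_congr fun x _ => by rw [hsp x]; rfl
  have hint : PySem.Set.inter (PySem.Dict.ofList py_labels).keys (PySem.Dict.ofList js_labels).keys
      = (PySem.Dict.ofList py_labels).keys.filter
          (fun k => PySem.Set.contains (PySem.Dict.ofList js_labels).keys k) := by
    unfold PySem.Set.inter PySem.Set.contains
    rfl
  have b3 : List.filter (fun k => (PySem.List.sorted (PySem.Dict.ofList js_labels).keys (fun k => k)).contains k
          && ((PySem.Dict.ofList py_labels).getD k "" != (PySem.Dict.ofList js_labels).getD k ""))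
        (PySem.List.sorted (PySem.Dict.ofList py_labels).keys (fun k => k))
      = List.filter (fun k => (PySem.Dict.ofList py_labels).getD k "" != (PySem.Dict.ofList js_labels).getD k "")
          (PySem.List.sorted (PySem.Set.inter (PySem.Dict.ofList py_labels).keys (PySem.Dict.ofList js_labels).keys) (fun k => k)) := by
    rw [hint, sorted_filter_comm _ (hk.filter _), sorted_filter_comm _ hk, List.filter_filter]
    congr 1
    exact List.filter_congr fun x _ => by rw [hsj x, Bool.and_comm]
  rw [b1, b2, b3]
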